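-- pv_equiv track=rewrite | github.com/ecreed-work/TagmentationAnalysis_Rotation | postprocessHelpers.py | scan_degenerate_hamming
-- ===== SOURCE A (Python) =====
-- from typing import Optional, List, Literal, Dict
--
-- IUPAC_DNA: Dict[str, str] = {
--     "A": "A",
--     "C": "C",
--     "G": "G",
--     "T": "T",
--     "U": "T",
--     "R": "[AG]",
--     "Y": "[CT]",
--     "S": "[GC]",
--     "W": "[AT]",
--     "K": "[GT]",
--     "M": "[AC]",
--     "B": "[CGT]",
--     "D": "[AGT]",
--     "H": "[ACT]",
--     "V": "[ACG]",
--     "N": "[ACGT]",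
-- }
--
-- def degenerate_hamming(window: str, motif_iupac: str) -> int:
--     """
--     Returns number of mismatches under IUPAC degeneracy.
--     0 = perfect match, higher = worse.
--     """
--     window = window.upper().replace("U", "T")
--     motif_iupac = motif_iupac.upper()
--     if len(window) != len(motif_iupac):
--         raise ValueError("window and motif must have the same length")
--
--     mismatches = 0
--     for b, code in zip(window, motif_iupac):
--         allowed = IUPAC_DNA.get(code)
--         if allowed is None:
--             raise ValueError(f"Unknown IUPAC code: {code}")
--         if b not in allowed:
--             mismatches += 1
--     return mismatches
--
-- def scan_degenerate_hamming(seq: str, motif_iupac: str):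
--     seq = seq.upper().replace("U", "T")
--     m = len(motif_iupac)
--     hits = []
--     for i in range(len(seq) - m + 1):
--         w = seq[i:i+m]
--         d = degenerate_hamming(w, motif_iupac)
--         hits.append((i, d, w))
--     # sort by best (fewest mismatches)
--     hits.sort(key=lambda t: t[1])
--     return hits
-- ===== SOURCE B (Python) =====
-- from typing import Dict
--
-- IUPAC_DNA: Dict[str, str] = {
--     "A": "A", "C": "C", "G": "G", "T": "T", "U": "T",
--     "R": "[AG]", "Y": "[CT]", "S": "[GC]", "W": "[AT]",
--     "K": "[GT]", "M": "[AC]", "B": "[CGT]", "D": "[AGT]",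
--     "H": "[ACT]", "V": "[ACG]", "N": "[ACGT]",
-- }
--
-- def scan_degenerate_hamming(seq, motif_iupac):
--     s = seq.upper().replace("U", "T")
--     m = len(motif_iupac)
--     n = len(s) - m + 1
--     if n <= 0:
--         return []
--     # validate the motif once; build the permitted-character set per position
--     allowed = []
--     for code in motif_iupac.upper():
--         pat = IUPAC_DNA.get(code)
--         if pat is None:
--             raise ValueError(f"Unknown IUPAC code: {code}")
--         allowed.append(set(pat))
--     # column-major counting: one pass per motif position over all window starts
--     counts = [0] * n
--     for j, ok in enumerate(allowed):
--         counts = [counts[i] + (0 if s[i + j] in ok else 1) for i in range(n)]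
--     hits = [(i, counts[i], s[i:i + m]) for i in range(n)]
--     return sorted(hits, key=lambda t: t[1])
-- ===== Notes on version B (the rewrite author's own statement) =====
-- stated objective: alternative
-- what changed: B validates the motif once up front (building per-position permitted-character sets) and counts mismatches column-major over all window starts, then builds and stably sorts the hit list, instead of A's per-window re-slicing, re-uppercasing and re-validating via degenerate_hamming.
import Mathlib
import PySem

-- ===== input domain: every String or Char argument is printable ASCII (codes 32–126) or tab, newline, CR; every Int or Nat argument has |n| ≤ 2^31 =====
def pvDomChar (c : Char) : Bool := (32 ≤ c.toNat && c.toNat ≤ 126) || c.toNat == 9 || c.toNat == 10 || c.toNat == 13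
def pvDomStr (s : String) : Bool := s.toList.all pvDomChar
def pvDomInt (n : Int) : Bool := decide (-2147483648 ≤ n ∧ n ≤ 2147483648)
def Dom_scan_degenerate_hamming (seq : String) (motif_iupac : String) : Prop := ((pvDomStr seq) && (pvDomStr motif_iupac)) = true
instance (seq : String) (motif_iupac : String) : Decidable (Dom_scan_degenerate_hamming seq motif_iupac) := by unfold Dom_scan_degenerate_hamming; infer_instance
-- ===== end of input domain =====

-- B validates the motif once and counts mismatches column-major (one pass per motif
-- position over all window starts) instead of re-slicing, re-normalising and re-validating
-- per window; objective: alternative decomposition of the same O(n·m) scan.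

-- ===== PORT A =====
-- the module constant IUPAC_DNA: keys are the 1-char codes, values the pattern strings
-- as character lists (brackets included — Python's `b in allowed` for a 1-char b is
-- exactly character membership in the value string).
def iupacTable : List (Char × List Char) :=
  [('A', ['A']), ('C', ['C']), ('G', ['G']), ('T', ['T']), ('U', ['T']),
   ('R', ['[','A','G',']']), ('Y', ['[','C','T',']']), ('S', ['[','G','C',']']),
   ('W', ['[','A','T',']']), ('K', ['[','G','T',']']), ('M', ['[','A','C',']']),
   ('B', ['[','C','G','T',']']), ('D', ['[','A','G','T',']']), ('H', ['[','A','C','T',']']),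
   ('V', ['[','A','C','G',']']), ('N', ['[','A','C','G','T',']'])]

-- degenerate_hamming; `none` is exactly where the Python helper raises ValueError
def degenerate_hamming_A (window : String) (motif_iupac : String) : Option Int :=
  let w := PySem.Str.replace (PySem.Str.upper window) "U" "T"
  let mo := PySem.Str.upper motif_iupac
  if PySem.Str.len w ≠ PySem.Str.len mo then none
  else
    (w.toList.zip mo.toList).foldl
      (fun acc bc =>
        acc.bind (fun mm =>
          match iupacTable.lookup bc.2 with
          | none => none
          | some allowed => if allowed.contains bc.1 then some mm else some (mm + 1)))
      (some 0)

def scan_degenerate_hamming (seq : String) (motif_iupac : String) : List (Int × Int × String) :=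
  let s := PySem.Str.replace (PySem.Str.upper seq) "U" "T"
  let m := PySem.Str.len motif_iupac
  let hits? :=
    (PySem.List.pyRange 0 (PySem.Str.len s - m + 1)).foldl
      (fun acc i =>
        acc.bind (fun h =>
          let w := PySem.Str.slice s (some i) (some (i + m))
          (degenerate_hamming_A w motif_iupac).map (fun d => h ++ [(i, d, w)])))
      (some [])
  match hits? with
  | none => []      -- the Python raises ValueError here; such inputs are outside Pre_
  | some hits => PySem.List.sorted hits (fun t => t.2.1) false

-- ===== PORT B =====
def scan_degenerate_hamming_alt (seq : String) (motif_iupac : String) : List (Int × Int × String) :=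
  let s := PySem.Str.replace (PySem.Str.upper seq) "U" "T"
  let m := PySem.Str.len motif_iupac
  let n := PySem.Str.len s - m + 1
  if n ≤ 0 then []
  else
    let allowed? :=
      (PySem.Str.upper motif_iupac).toList.foldl
        (fun acc code =>
          acc.bind (fun l =>
            match iupacTable.lookup code with
            | none => none                 -- Source B raises ValueError here; outside Pre_
            | some pat => some (l ++ [PySem.Set.ofList pat])))
        (some [])
    match allowed? with
    | none => []
    | some allowed =>
      let counts0 := (PySem.List.pyRange 0 n).map (fun _ => (0 : Int))
      let counts :=
        (PySem.List.enumerate allowed).foldl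
          (fun counts jok =>
            (PySem.List.pyRange 0 n).map
              (fun i => PySem.List.pyGetD counts i 0 +
                 -- s[i + j] is always in range inside this loop; the default is never used
                 (if jok.2.contains (PySem.List.pyGetD s.toList (i + jok.1) ' ') then 0 else 1)))
          counts0
      let hits := (PySem.List.pyRange 0 n).map
        (fun i => (i, PySem.List.pyGetD counts i 0, PySem.Str.slice s (some i) (some (i + m))))
      PySem.List.sorted hits (fun t => t.2.1) false

-- ===== PRECONDITION & SPEC =====
def iupacCodes : List Char := ['A','C','G','T','U','R','Y','S','W','K','M','B','D','H','V','N']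

-- Pre_ excludes exactly the inputs on which A raises ValueError ("Unknown IUPAC code"):
-- at least one window exists and some uppercased motif character is not an IUPAC code.
def Pre_scan_degenerate_hamming (seq : String) (motif_iupac : String) : Prop :=
  (decide (PySem.Str.len seq - PySem.Str.len motif_iupac + 1 ≤ 0)
    || (PySem.Chars.upper motif_iupac.toList).all (fun c => iupacCodes.contains c)) = true
instance (seq : String) (motif_iupac : String) : Decidable (Pre_scan_degenerate_hamming seq motif_iupac) := by
  unfold Pre_scan_degenerate_hamming; infer_instance

def pvWitness_scan_degenerate_hamming : String × String := ("AcGUtRa", "aNru")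

def Spec_scan_degenerate_hamming (seq : String) (motif_iupac : String) (out : List (Int × Int × String)) : Prop := out = scan_degenerate_hamming_alt seq motif_iupac
instance (seq : String) (motif_iupac : String) (out : List (Int × Int × String)) : Decidable (Spec_scan_degenerate_hamming seq motif_iupac out) := by unfold Spec_scan_degenerate_hamming; infer_instance

-- ===== CLAIM (what is proved, stated in full; the proofs are below) =====
def Claim_equal_scan_degenerate_hamming : Prop := ∀ (seq : String) (motif_iupac : String), Dom_scan_degenerate_hamming seq motif_iupac → Pre_scan_degenerate_hamming seq motif_iupac → Spec_scan_degenerate_hamming seq motif_iupac (scan_degenerate_hamming seq motif_iupac)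

-- ===== LEMMAS AND PROOFS =====

-- `.replace("U","T")` on characters: pointwise substitution
def pvF (c : Char) : Char := if c = 'U' then 'T' else c
-- the normalisation `upper` then `replace("U","T")`, per character
def pvNorm (c : Char) : Char := pvF (PySem.Chars.upperChar c)
-- value of IUPAC_DNA.get(code) when present
def pvPat (c : Char) : List Char := (iupacTable.lookup c).getD []
-- mismatch indicator of one window character against one motif code
def pvMiss (b code : Char) : Int := if (pvPat code).contains b then 0 else 1
-- total mismatch count of a window against the motif
def pvZipSum (wz mz : List Char) : Int := ((wz.zip mz).map (fun bc => pvMiss bc.1 bc.2)).sum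

theorem pv_go_single (l : List Char) : ∀ (fuel : Nat) (acc : List Char), l.length ≤ fuel →
    PySem.Chars.replace.go ['U'] ['T'] fuel l acc = acc.reverse ++ l.map pvF := by
  induction l with
  | nil => intro fuel acc h; cases fuel <;> simp [PySem.Chars.replace.go]
  | cons c t ih =>
    intro fuel acc h
    cases fuel with
    | zero => simp at h
    | succ f =>
      rw [PySem.Chars.replace.go]
      by_cases hc : c = 'U'
      · subst hc
        simp [List.isPrefixOf, ih f _ (by simpa using h), pvF]
      · have hpre : (['U'].isPrefixOf (c :: t)) = false := by
          simp [List.isPrefixOf]; exact fun he => absurd he.symm hc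
        simp [hpre, ih f _ (by simpa using h), pvF, hc]

theorem pv_replace_single (cs : List Char) :
    PySem.Chars.replace cs ['U'] ['T'] = cs.map pvF := by
  rw [PySem.Chars.replace]
  simp [pv_go_single cs cs.length [] le_rfl]

theorem pv_sList (s : String) :
    (PySem.Str.replace (PySem.Str.upper s) "U" "T").toList = s.toList.map pvNorm := by
  rw [PySem.Str.toList_replace, PySem.Str.toList_upper]
  show PySem.Chars.replace _ ['U'] ['T'] = _
  rw [pv_replace_single]
  simp [PySem.Chars.upper, List.map_map, pvNorm, Function.comp]

theorem pv_char_le_iff (a b : Char) : a ≤ b ↔ a.toNat ≤ b.toNat := by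
  rw [Char.le_def]; exact UInt32.le_iff_toNat_le ..

theorem pv_islower_upperChar (c : Char) : PySem.Chars.islower (PySem.Chars.upperChar c) = false := by
  unfold PySem.Chars.upperChar
  by_cases h : PySem.Chars.islower c = true
  · simp only [h, if_true]
    have h1 : 97 ≤ c.toNat ∧ c.toNat ≤ 122 := by
      unfold PySem.Chars.islower at h
      rw [Bool.and_eq_true, decide_eq_true_iff, decide_eq_true_iff, pv_char_le_iff, pv_char_le_iff] at h
      exact h
    have hv : (c.toNat - 32).isValidChar := by left; omega
    have ht : (Char.ofNat (c.toNat - 32)).toNat = c.toNat - 32 := by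
      rw [Char.ofNat, dif_pos hv]; exact Char.toNat_ofNatAux hv
    unfold PySem.Chars.islower
    rw [Bool.and_eq_false_iff]
    left
    rw [decide_eq_false_iff_not, pv_char_le_iff, ht]
    show ¬ (97 ≤ _)
    omega
  · simp only [Bool.not_eq_true] at h
    simp [h]

theorem pv_upperChar_islower_false (c : Char) (h : PySem.Chars.islower c = false) :
    PySem.Chars.upperChar c = c := by
  unfold PySem.Chars.upperChar; simp [h]

theorem pv_upperChar_norm (c : Char) : PySem.Chars.upperChar (pvNorm c) = pvNorm c := by
  apply pv_upperChar_islower_false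
  unfold pvNorm pvF
  by_cases h : PySem.Chars.upperChar c = 'U'
  · simp [h]; decide
  · simp [h, pv_islower_upperChar]

theorem pv_f_norm (c : Char) : pvF (pvNorm c) = pvNorm c := by
  unfold pvNorm pvF
  by_cases h : PySem.Chars.upperChar c = 'U' <;> simp [h]

theorem pv_norm_idem (c : Char) : pvNorm (pvNorm c) = pvNorm c := by
  show pvF (PySem.Chars.upperChar (pvNorm c)) = pvNorm c
  rw [pv_upperChar_norm, pv_f_norm]

theorem pv_lookup_isSome (c : Char) : (iupacTable.lookup c).isSome = true ↔ c ∈ iupacCodes := by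
  constructor
  · intro h
    simp only [iupacTable, List.lookup] at h
    repeat' split at h
    all_goals simp_all [iupacCodes]
  · intro h
    fin_cases h <;> decide

theorem pv_slice_window (cs : List Char) (k m : Nat) (h : k + m ≤ cs.length) :
    PySem.Chars.slice cs (some (k : Int)) (some ((k : Int) + (m : Int))) = (cs.drop k).take m := by
  show PySem.List.slice cs _ _ = _
  rw [PySem.List.slice]
  have h1 : PySem.List.clampIdx cs.length (k : Int) = k := by
    rw [PySem.List.clampIdx]; split
    · omega
    · rw [Int.toNat_natCast]; omega
  have h2 : PySem.List.clampIdx cs.length ((k : Int) + (m : Int)) = k + m := by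
    rw [PySem.List.clampIdx]; split
    · omega
    · have : ((k : Int) + (m : Int)).toNat = k + m := by omega
      rw [this]; omega
  simp only [h1, h2]
  congr 1
  omega

theorem pv_degfold (wz : List Char) : ∀ (mz : List Char) (a : Int),
    (∀ code ∈ mz, (iupacTable.lookup code).isSome = true) →
    (wz.zip mz).foldl
      (fun acc bc =>
        acc.bind (fun mm =>
          match iupacTable.lookup bc.2 with
          | none => none
          | some allowed => if allowed.contains bc.1 then some mm else some (mm + 1)))
      (some a)
    = some (a + pvZipSum wz mz) := by
  induction wz with
  | nil => intro mz a _; simp [pvZipSum]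
  | cons b bs ih =>
    intro mz a h
    cases mz with
    | nil => simp [pvZipSum]
    | cons c cs =>
      obtain ⟨pat, hp⟩ := Option.isSome_iff_exists.mp (h c (by simp))
      have hrest : ∀ code ∈ cs, (iupacTable.lookup code).isSome = true :=
        fun code hc => h code (by simp [hc])
      simp only [List.zip_cons_cons, List.foldl_cons, Option.bind_some, hp]
      have hz : pvZipSum (b :: bs) (c :: cs) = pvMiss b c + pvZipSum bs cs := by
        simp [pvZipSum, pvMiss]
      by_cases hb : b ∈ pat
      · rw [if_pos (List.contains_iff_mem.mpr hb), ih cs a hrest, hz]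
        have hm : pvMiss b c = 0 := by simp [pvMiss, pvPat, hp, hb]
        rw [hm, zero_add]
      · rw [if_neg (by simp [hb]), ih cs (a + 1) hrest, hz]
        have hm : pvMiss b c = 1 := by simp [pvMiss, pvPat, hp, hb]
        rw [hm]
        congr 1
        ring

theorem pv_deg_eval (w motif : String) (hfix : w.toList.map pvNorm = w.toList)
    (hlen : w.toList.length = motif.toList.length)
    (hvalid : ∀ code ∈ PySem.Chars.upper motif.toList, (iupacTable.lookup code).isSome = true) :
    degenerate_hamming_A w motif = some (pvZipSum w.toList (PySem.Chars.upper motif.toList)) := by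
  unfold degenerate_hamming_A
  have hw : (PySem.Str.replace (PySem.Str.upper w) "U" "T").toList = w.toList := by
    rw [pv_sList w, hfix]
  have hmo : (PySem.Str.upper motif).toList = PySem.Chars.upper motif.toList :=
    PySem.Str.toList_upper motif
  have hlen2 : PySem.Str.len (PySem.Str.replace (PySem.Str.upper w) "U" "T")
      = PySem.Str.len (PySem.Str.upper motif) := by
    rw [PySem.Str.len_eq, PySem.Str.len_eq, hw, hmo]
    simp [PySem.Chars.upper, hlen]
  rw [if_neg (fun h => h hlen2)]
  rw [hw, hmo, pv_degfold w.toList (PySem.Chars.upper motif.toList) 0 hvalid, zero_add]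

theorem pv_foldA {β : Type} (L : List Int) (g : Int → Option Int) (d : Int → Int) (w : Int → β) :
    ∀ (init : List (Int × Int × β)), (∀ i ∈ L, g i = some (d i)) →
    L.foldl (fun acc i => acc.bind (fun h => (g i).map (fun v => h ++ [(i, v, w i)]))) (some init)
      = some (init ++ L.map (fun i => (i, d i, w i))) := by
  induction L with
  | nil => intro init _; simp
  | cons x xs ih =>
    intro init h
    simp only [List.foldl_cons, Option.bind_some, h x (by simp), Option.map_some, List.map_cons]
    rw [ih _ (fun i hi => h i (by simp [hi]))]
    simp

theorem pv_foldB (mz : List Char) :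
    ∀ (init : List (PySem.Set Char)), (∀ code ∈ mz, (iupacTable.lookup code).isSome = true) →
    mz.foldl
      (fun acc code =>
        acc.bind (fun l =>
          match iupacTable.lookup code with
          | none => none
          | some pat => some (l ++ [PySem.Set.ofList pat])))
      (some init)
    = some (init ++ mz.map (fun code => PySem.Set.ofList (pvPat code))) := by
  induction mz with
  | nil => intro init _; simp
  | cons c cs ih =>
    intro init h
    obtain ⟨pat, hp⟩ := Option.isSome_iff_exists.mp (h c (by simp))
    simp only [List.foldl_cons, Option.bind_some, hp, List.map_cons]
    rw [ih _ (fun code hc => h code (by simp [hc]))]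
    simp [pvPat, hp]

theorem pv_counts {β : Type} (n : Nat) (f : Int → β → Int) (L : List β) :
    ∀ (base : Int → Int),
    L.foldl
      (fun counts e =>
        (PySem.List.pyRange 0 (n : Int)).map (fun i => PySem.List.pyGetD counts i 0 + f i e))
      ((PySem.List.pyRange 0 (n : Int)).map base)
    = (PySem.List.pyRange 0 (n : Int)).map (fun i => base i + (L.map (f i)).sum) := by
  induction L with
  | nil => intro base; simp
  | cons x xs ih =>
    intro base
    simp only [List.foldl_cons]
    have hstep : (PySem.List.pyRange 0 (n : Int)).map
        (fun i => PySem.List.pyGetD ((PySem.List.pyRange 0 (n : Int)).map base) i 0 + f i x)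
        = (PySem.List.pyRange 0 (n : Int)).map (fun i => base i + f i x) := by
      apply List.map_eq_map_iff.mpr
      intro i hi
      have hb : 0 ≤ i ∧ i < (n : Int) := by
        rw [PySem.List.mem_pyRange_one] at hi; exact hi
      have hk : i = ((i.toNat : Nat) : Int) := by omega
      rw [hk, PySem.List.pyGetD_map_pyRange base n i.toNat 0 (by omega)]
    rw [hstep, ih (fun i => base i + f i x)]
    apply List.map_eq_map_iff.mpr
    intro i _
    simp [add_assoc]

theorem pv_colsum (sl : List Char) (mz : List Char) : ∀ (k j0 : Nat),
    k + j0 + mz.length ≤ sl.length →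
    ((PySem.List.enumerate (mz.map (fun code => PySem.Set.ofList (pvPat code))) (j0 : Int)).map
        (fun jok => if jok.2.contains (PySem.List.pyGetD sl ((k : Int) + jok.1) ' ') then (0 : Int) else 1)).sum
    = pvZipSum ((sl.drop (k + j0)).take mz.length) mz := by
  induction mz with
  | nil => intro k j0 _; simp [pvZipSum]
  | cons c cs ih =>
    intro k j0 h
    have hlt : k + j0 < sl.length := by simp at h; omega
    simp only [List.map_cons, PySem.List.enumerate_cons, List.map_cons, List.sum_cons]
    have hcast : ((j0 : Int) + 1) = ((j0 + 1 : Nat) : Int) := by push_cast; ring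
    rw [hcast, ih k (j0 + 1) (by simp at h ⊢; omega)]
    have hidx : PySem.List.pyGetD sl ((k : Int) + (j0 : Int)) ' ' = sl[k + j0] := by
      have hc2 : ((k : Int) + (j0 : Int)) = (((k + j0 : Nat)) : Int) := by push_cast; ring
      rw [hc2, PySem.List.pyGetD_natCast, List.getD_eq_getElem sl ' ' hlt]
    have hwin : (sl.drop (k + j0)).take (c :: cs).length
        = sl[k + j0] :: ((sl.drop (k + j0 + 1)).take cs.length) := by
      simp only [List.length_cons]
      rw [List.drop_eq_getElem_cons hlt, List.take_succ_cons]
    rw [hwin]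
    have hz : pvZipSum (sl[k + j0] :: ((sl.drop (k + j0 + 1)).take cs.length)) (c :: cs)
        = pvMiss sl[k + j0] c + pvZipSum ((sl.drop (k + j0 + 1)).take cs.length) cs := by
      simp [pvZipSum, pvMiss]
    rw [hz]
    have harith : k + (j0 + 1) = k + j0 + 1 := by omega
    rw [harith]
    congr 1
    simp only [hidx]
    by_cases hb : sl[k + j0] ∈ pvPat c
    · simp [pvMiss, hb, PySem.Set.mem_ofList]
    · simp [pvMiss, hb, PySem.Set.mem_ofList]

-- ===== VERDICT (by name: the statement is the Claim_ definition above) =====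
theorem scan_degenerate_hamming_spec : Claim_equal_scan_degenerate_hamming := by
  intro seq motif hdom hpre
  unfold Spec_scan_degenerate_hamming
  clear hdom
  unfold scan_degenerate_hamming scan_degenerate_hamming_alt
  simp only []
  set sS := PySem.Str.replace (PySem.Str.upper seq) "U" "T" with hsSdef
  have hS : sS.toList = seq.toList.map pvNorm := pv_sList seq
  have hlenS : sS.toList.length = seq.toList.length := by rw [hS]; simp
  by_cases hn : PySem.Str.len sS - PySem.Str.len motif + 1 ≤ 0
  · rw [PySem.List.pyRange_one_eq_nil hn, if_pos hn]
    rfl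
  · rw [not_le] at hn
    have hml : motif.toList.length ≤ seq.toList.length := by
      rw [PySem.Str.len_eq, PySem.Str.len_eq, hlenS] at hn; omega
    set mzU := PySem.Chars.upper motif.toList with hmzU
    have hmlen : mzU.length = motif.toList.length := by simp [hmzU, PySem.Chars.upper]
    set nN : Nat := seq.toList.length - motif.toList.length + 1 with hnN
    have hcast : PySem.Str.len sS - PySem.Str.len motif + 1 = ((nN : Nat) : Int) := by
      rw [PySem.Str.len_eq, PySem.Str.len_eq, hlenS, hnN]; push_cast [hml]; omega
    rw [hcast]
    rw [if_neg (show ¬ ((nN : Int) ≤ 0) by omega)]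
    have hv : ∀ code ∈ mzU, (iupacTable.lookup code).isSome = true := by
      unfold Pre_scan_degenerate_hamming at hpre
      rw [Bool.or_eq_true] at hpre
      rcases hpre with hpre | hpre
      · exfalso
        have hpre' := of_decide_eq_true hpre
        rw [PySem.Str.len_eq, PySem.Str.len_eq] at hpre'
        simp only [String.length_toList] at hpre' hml
        omega
      · intro code hc
        exact (pv_lookup_isSome code).mpr
          (List.contains_iff_mem.mp (List.all_eq_true.mp hpre code (hmzU ▸ hc)))
    rw [PySem.Str.toList_upper motif, ← hmzU, pv_foldB mzU [] hv]
    simp only [List.nil_append]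
    have hform : ∀ i ∈ PySem.List.pyRange 0 ((nN : Nat) : Int),
        degenerate_hamming_A (PySem.Str.slice sS (some i) (some (i + PySem.Str.len motif))) motif
        = some ((fun i : Int => pvZipSum ((sS.toList.drop i.toNat).take motif.toList.length) mzU) i) := by
      intro i hi
      rw [PySem.List.mem_pyRange_one] at hi
      have hk : i = ((i.toNat : Nat) : Int) := by omega
      set k := i.toNat with hkdef
      have hkn : k < nN := by omega
      have hbound : k + motif.toList.length ≤ sS.toList.length := by rw [hlenS]; omega
      have hwt : (PySem.Str.slice sS (some i) (some (i + PySem.Str.len motif))).toList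
          = (sS.toList.drop k).take motif.toList.length := by
        rw [PySem.Str.slice]
        rw [String.toList_ofList]
        rw [PySem.Str.len_eq, hk]
        exact pv_slice_window sS.toList k motif.toList.length hbound
      have hfix : (PySem.Str.slice sS (some i) (some (i + PySem.Str.len motif))).toList.map pvNorm
          = (PySem.Str.slice sS (some i) (some (i + PySem.Str.len motif))).toList := by
        rw [hwt, hS, ← List.map_drop, ← List.map_take, List.map_map]
        apply List.map_congr_left
        intro x _
        exact pv_norm_idem x
      have hlenw : (PySem.Str.slice sS (some i) (some (i + PySem.Str.len motif))).toList.length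
          = motif.toList.length := by
        rw [hwt, List.length_take, List.length_drop]
        omega
      rw [pv_deg_eval _ motif hfix hlenw hv, hwt, hk]
      simp only [Int.toNat_natCast, ← hmzU]
    rw [pv_foldA (PySem.List.pyRange 0 ((nN : Nat) : Int))
        (fun i => degenerate_hamming_A (PySem.Str.slice sS (some i) (some (i + PySem.Str.len motif))) motif)
        (fun i : Int => pvZipSum ((sS.toList.drop i.toNat).take motif.toList.length) mzU)
        (fun i => PySem.Str.slice sS (some i) (some (i + PySem.Str.len motif)))
        [] hform]
    simp only [List.nil_append]
    rw [pv_counts nN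
        (fun i jok => if jok.2.contains (PySem.List.pyGetD sS.toList (i + jok.1) ' ') then (0:Int) else 1)
        (PySem.List.enumerate (mzU.map (fun code => PySem.Set.ofList (pvPat code))))
        (fun _ => (0:Int))]
    refine congrArg (fun l => PySem.List.sorted l (fun t : Int × Int × String => t.2.1) false)
      (List.map_eq_map_iff.mpr ?_)
    intro i hi
    rw [PySem.List.mem_pyRange_one] at hi
    have hk : i = ((i.toNat : Nat) : Int) := by omega
    set k := i.toNat with hkdef
    have hkn : k < nN := by omega
    have hsum : ((PySem.List.enumerate (mzU.map (fun code => PySem.Set.ofList (pvPat code)))).map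
          (fun jok => if jok.2.contains (PySem.List.pyGetD sS.toList ((k : Int) + jok.1) ' ') then (0:Int) else 1)).sum
        = pvZipSum ((sS.toList.drop k).take motif.toList.length) mzU := by
      have h0 := pv_colsum sS.toList mzU k 0 (by rw [hlenS]; omega)
      simpa [hmlen] using h0
    rw [hk, PySem.List.pyGetD_map_pyRange _ nN k 0 hkn]
    simp only [zero_add]
    rw [hsum]
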